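-- pv_equiv track=rewrite | github.com/pc5401/my_BOJ | 백준/Gold/17779. 게리맨더링 2/게리맨더링 2.py | one_and_four
-- ===== SOURCE A (Python) =====
-- def one_and_four(N: int, district: list) -> list:
--     x, y, d1, d2 = district
--     table = [[0] * (N+1) for _ in range(N+1)]
--
--     for r in range(1, x+d1): # 1 번 구역
--         for c in range(1, y+1):
--             table[r][c] = 1
--
--     for r in range(1, x+d2+1): # 2 번 구역
--         for c in range(y+1, N+1):
--             table[r][c] = 2
--
--     for r in range(x+d1, N+1): # 3 번 구역
--         for c in range(1, y-d1+d2):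
--             table[r][c] = 3
--
--     for r in range(x+d2+1, N+1): # 4 번 구역
--         for c in range(y-d1+d2, N+1):
--             table[r][c] = 4
--
--     return table
-- ===== SOURCE B (Python) =====
-- def one_and_four(N: int, district: list) -> list:
--     x, y, d1, d2 = district
--
--     def label(r, c):
--         lab = 0
--         if 1 <= r < x + d1 and 1 <= c <= y:
--             lab = 1
--         if 1 <= r <= x + d2 and y + 1 <= c <= N:
--             lab = 2
--         if x + d1 <= r <= N and 1 <= c < y - d1 + d2:
--             lab = 3
--         if x + d2 + 1 <= r <= N and y - d1 + d2 <= c <= N: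
--             lab = 4
--         return lab
--
--     return [[label(r, c) for c in range(N + 1)] for r in range(N + 1)]
-- ===== Notes on version B (the rewrite author's own statement) =====
-- stated objective: alternative
-- what changed: A paints the grid imperatively with four sequential region loop nests whose later writes overwrite earlier ones; B builds the grid in one pass, classifying each cell by evaluating the four region conditions and keeping the last matching label.
import Mathlib
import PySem

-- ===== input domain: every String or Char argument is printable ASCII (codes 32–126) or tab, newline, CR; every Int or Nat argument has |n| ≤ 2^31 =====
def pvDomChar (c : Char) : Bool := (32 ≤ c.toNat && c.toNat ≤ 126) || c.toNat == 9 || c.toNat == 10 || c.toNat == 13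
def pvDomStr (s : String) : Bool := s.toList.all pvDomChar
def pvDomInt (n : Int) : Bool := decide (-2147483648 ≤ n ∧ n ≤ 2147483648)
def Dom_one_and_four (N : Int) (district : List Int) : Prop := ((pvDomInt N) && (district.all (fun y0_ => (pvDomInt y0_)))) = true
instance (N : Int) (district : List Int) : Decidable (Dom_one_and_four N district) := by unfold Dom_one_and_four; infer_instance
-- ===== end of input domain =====

-- B replaces A's four sequential region-painting loop nests by a single per-cell
-- classification (last matching region wins); same cost class, different decomposition.

-- ===== PORT A =====
-- table[r][c] = v : Python list assignment through a possibly negative (wrapping) index;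
-- PySem.List.pySetD is a no-op exactly where Python raises IndexError (excluded by Pre_).
def pvSet2 (t : List (List Int)) (r c v : Int) : List (List Int) :=
  PySem.List.pySetD t r (PySem.List.pySetD (PySem.List.pyGetD t r []) c v)

-- one of A's 'for r in range(a, b): for c in range(u, v): table[r][c] = w' blocks
def pvPaint (a b u v w : Int) (t0 : List (List Int)) : List (List Int) :=
  (PySem.List.pyRange a b 1).foldl
    (fun t r => (PySem.List.pyRange u v 1).foldl (fun t' c => pvSet2 t' r c w) t) t0

def one_and_four (N : Int) (district : List Int) : List (List Int) :=
  match district with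
  | [x, y, d1, d2] =>
    let table := List.replicate (N + 1).toNat (List.replicate (N + 1).toNat (0 : Int))
    let t1 := pvPaint 1 (x + d1) 1 (y + 1) 1 table                     -- 1 번 구역
    let t2 := pvPaint 1 (x + d2 + 1) (y + 1) (N + 1) 2 t1             -- 2 번 구역
    let t3 := pvPaint (x + d1) (N + 1) 1 (y - d1 + d2) 3 t2           -- 3 번 구역
    pvPaint (x + d2 + 1) (N + 1) (y - d1 + d2) (N + 1) 4 t3           -- 4 번 구역
  | _ => []    -- unpacking raises ValueError; outside Pre_

-- ===== PORT B =====
def pvLabel (N x y d1 d2 r c : Int) : Int :=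
  let lab : Int := 0
  let lab := if 1 ≤ r ∧ r < x + d1 ∧ 1 ≤ c ∧ c ≤ y then 1 else lab
  let lab := if 1 ≤ r ∧ r ≤ x + d2 ∧ y + 1 ≤ c ∧ c ≤ N then 2 else lab
  let lab := if x + d1 ≤ r ∧ r ≤ N ∧ 1 ≤ c ∧ c < y - d1 + d2 then 3 else lab
  let lab := if x + d2 + 1 ≤ r ∧ r ≤ N ∧ y - d1 + d2 ≤ c ∧ c ≤ N then 4 else lab
  lab

-- 'x, y, d1, d2 = district' as a length guard plus indexing (ValueError outside Pre_)
def one_and_four_alt (N : Int) (district : List Int) : List (List Int) :=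
  if district.length = 4 then
    let x := PySem.List.pyGetD district 0 0
    let y := PySem.List.pyGetD district 1 0
    let d1 := PySem.List.pyGetD district 2 0
    let d2 := PySem.List.pyGetD district 3 0
    (PySem.List.pyRange 0 (N + 1) 1).map (fun r =>
      (PySem.List.pyRange 0 (N + 1) 1).map (fun c => pvLabel N x y d1 d2 r c))
  else []

-- ===== PRECONDITION & SPEC =====
-- Pre_ excludes exactly the inputs on which A raises: a district that is not a 4-tuple
-- (ValueError on unpacking), and parameter combinations under which some executed write
-- table[r][c] has an index below -(N+1) or above N (IndexError).  Wherever A returns, Pre_ holds.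
def Pre_one_and_four (N : Int) (district : List Int) : Prop :=
  district.length = 4 ∧
  (let x := PySem.List.pyGetD district 0 0
   let y := PySem.List.pyGetD district 1 0
   let d1 := PySem.List.pyGetD district 2 0
   let d2 := PySem.List.pyGetD district 3 0
   ((2 ≤ x + d1 ∧ 1 ≤ y) → (x + d1 - 1 ≤ N ∧ y ≤ N)) ∧
   ((1 ≤ x + d2 ∧ y + 1 ≤ N) → (x + d2 ≤ N ∧ -(N + 1) ≤ y + 1)) ∧
   ((x + d1 ≤ N ∧ 2 ≤ y - d1 + d2) → (-(N + 1) ≤ x + d1 ∧ y - d1 + d2 - 1 ≤ N)) ∧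
   ((x + d2 + 1 ≤ N ∧ y - d1 + d2 ≤ N) → (-(N + 1) ≤ x + d2 + 1 ∧ -(N + 1) ≤ y - d1 + d2)))
instance (N : Int) (district : List Int) : Decidable (Pre_one_and_four N district) := by
  unfold Pre_one_and_four; infer_instance

def pvWitness_one_and_four : Int × List Int := (2, [1, 1, 1, 1])

def Spec_one_and_four (N : Int) (district : List Int) (out : List (List Int)) : Prop := out = one_and_four_alt N district
instance (N : Int) (district : List Int) (out : List (List Int)) : Decidable (Spec_one_and_four N district out) := by unfold Spec_one_and_four; infer_instance

-- ===== CLAIM (what is proved, stated in full; the proofs are below) =====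
def Claim_equal_one_and_four : Prop := ∀ (N : Int) (district : List Int), Dom_one_and_four N district → Pre_one_and_four N district → Spec_one_and_four N district (one_and_four N district)

-- ===== LEMMAS AND PROOFS =====

-- Python's resolved index: i itself if 0 ≤ i, else i + n (as a Nat)
def pvWrap (n : Nat) (i : Int) : Nat := if 0 ≤ i then i.toNat else n - (-i).toNat

lemma pvWrap_lt (n : Nat) (i : Int) (h1 : -(n : Int) ≤ i) (h2 : i < n) : pvWrap n i < n := by
  unfold pvWrap; split_ifs <;> omega

lemma pyIdx?_eq_wrap (n : Nat) (i : Int) (h1 : -(n : Int) ≤ i) (h2 : i < n) :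
    PySem.List.pyIdx? n i = some (pvWrap n i) := by
  unfold PySem.List.pyIdx? pvWrap
  split_ifs <;> first | rfl | omega

lemma pySetD_eq_set {α : Type} (xs : List α) (i : Int) (v : α)
    (h1 : -(xs.length : Int) ≤ i) (h2 : i < xs.length) :
    PySem.List.pySetD xs i v = xs.set (pvWrap xs.length i) v := by
  unfold PySem.List.pySetD PySem.List.pySet?
  rw [pyIdx?_eq_wrap _ _ h1 h2]; rfl

lemma pyGetD_eq_getD {α : Type} (xs : List α) (i : Int) (d : α)
    (h1 : -(xs.length : Int) ≤ i) (h2 : i < xs.length) :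
    PySem.List.pyGetD xs i d = xs.getD (pvWrap xs.length i) d := by
  unfold PySem.List.pyGetD PySem.List.pyGet?
  rw [pyIdx?_eq_wrap _ _ h1 h2]
  simp [List.getD_eq_getElem?_getD]

lemma pySetD_out_of_range {α : Type} (xs : List α) (i : Int) (v : α)
    (h : ¬ (-(xs.length : Int) ≤ i ∧ i < xs.length)) :
    PySem.List.pySetD xs i v = xs := by
  have hnone : PySem.List.pyIdx? xs.length i = none := by
    unfold PySem.List.pyIdx?
    split_ifs <;> first | rfl | (exact absurd ⟨by omega, by omega⟩ h)
  unfold PySem.List.pySetD PySem.List.pySet?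
  rw [hnone]; rfl

lemma getD_set {α : Type} (l : List α) (k i : Nat) (a d : α) (hk : k < l.length) :
    (l.set k a).getD i d = if k = i then a else l.getD i d := by
  rw [List.getD_eq_getElem?_getD, List.getElem?_set]
  by_cases h : k = i
  · simp [h, h ▸ hk]
  · simp [h, ← List.getD_eq_getElem?_getD]

-- square shape invariant
def pvShape (t : List (List Int)) (n : Nat) : Prop :=
  t.length = n ∧ ∀ row ∈ t, row.length = n

lemma shape_pvSet2 {t : List (List Int)} {n : Nat} (h : pvShape t n) (r c v : Int) :
    pvShape (pvSet2 t r c v) n := by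
  obtain ⟨hl, hrows⟩ := h
  unfold pvSet2
  by_cases hr : -(t.length : Int) ≤ r ∧ r < t.length
  · have hw := pvWrap_lt t.length r hr.1 hr.2
    rw [pySetD_eq_set _ _ _ hr.1 hr.2]
    refine ⟨by simpa using hl, ?_⟩
    intro row hrow
    rcases List.mem_or_eq_of_mem_set hrow with h' | h'
    · exact hrows _ h'
    · subst h'
      rw [PySem.List.length_pySetD, pyGetD_eq_getD _ _ _ hr.1 hr.2,
          List.getD_eq_getElem _ _ (by omega)]
      exact hrows _ (List.getElem_mem _)
  · rw [pySetD_out_of_range _ _ _ hr]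
    exact ⟨hl, hrows⟩

-- cell accessor used by the characterisation
def pvCell (t : List (List Int)) (i j : Nat) : Int := (t.getD i []).getD j 0

lemma cell_pvSet2 {t : List (List Int)} {n : Nat} (ht : pvShape t n) {i j : Nat}
    (hi : i < n) (hj : j < n) {r c : Int} (hr1 : -(n : Int) ≤ r) (hr2 : r < n)
    (hc1 : -(n : Int) ≤ c) (hc2 : c < n) (v : Int) :
    pvCell (pvSet2 t r c v) i j =
      if pvWrap n r = i ∧ pvWrap n c = j then v else pvCell t i j := by
  obtain ⟨hl, hrows⟩ := ht
  have hwr : pvWrap n r < n := pvWrap_lt n r hr1 hr2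
  have hwc : pvWrap n c < n := pvWrap_lt n c hc1 hc2
  have hrow : PySem.List.pyGetD t r [] = t.getD (pvWrap n r) [] := by
    rw [pyGetD_eq_getD _ _ _ (by omega) (by omega), hl]
  have hrowlen : (t.getD (pvWrap n r) []).length = n := by
    rw [List.getD_eq_getElem _ _ (by omega)]
    exact hrows _ (List.getElem_mem _)
  unfold pvSet2
  rw [hrow,
      pySetD_eq_set (t.getD (pvWrap n r) []) c v (by rw [hrowlen]; omega)
        (by rw [hrowlen]; omega),
      hrowlen, pySetD_eq_set t r _ (by omega) (by omega), hl]
  unfold pvCell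
  rw [getD_set _ _ _ _ _ (by omega)]
  by_cases hri : pvWrap n r = i
  · rw [if_pos hri, getD_set _ _ _ _ _ (by rw [hrowlen]; omega)]
    by_cases hcj : pvWrap n c = j
    · simp [hri, hcj]
    · simp [hri, hcj]
  · rw [if_neg hri]
    simp [hri]

lemma shape_colfold {n : Nat} (L : List Int) (r v : Int) :
    ∀ {t : List (List Int)}, pvShape t n →
      pvShape (L.foldl (fun t' c => pvSet2 t' r c v) t) n := by
  induction L with
  | nil => intro t ht; simpa using ht
  | cons c L ih =>
      intro t ht
      simpa using ih (shape_pvSet2 ht r c v)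

lemma cell_colfold {n : Nat} (L : List Int) (r v : Int)
    (hr1 : -(n : Int) ≤ r) (hr2 : r < n)
    (hL : ∀ c ∈ L, -(n : Int) ≤ c ∧ c < n) {i j : Nat} (hi : i < n) (hj : j < n) :
    ∀ {t : List (List Int)}, pvShape t n →
      pvCell (L.foldl (fun t' c => pvSet2 t' r c v) t) i j =
        if pvWrap n r = i ∧ (∃ c ∈ L, pvWrap n c = j) then v else pvCell t i j := by
  induction L with
  | nil => intro t _; simp
  | cons c L ih =>
      intro t ht
      have hc := hL c (List.mem_cons_self ..)
      have hrest : ∀ c' ∈ L, -(n : Int) ≤ c' ∧ c' < n :=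
        fun c' hc' => hL c' (List.mem_cons_of_mem _ hc')
      simp only [List.foldl_cons]
      rw [ih hrest (shape_pvSet2 ht r c v), cell_pvSet2 ht hi hj hr1 hr2 hc.1 hc.2 v]
      have hmem : (∃ c' ∈ c :: L, pvWrap n c' = j) ↔
          (pvWrap n c = j ∨ ∃ c' ∈ L, pvWrap n c' = j) := by
        simp [List.mem_cons]
      by_cases h1 : pvWrap n r = i <;>
        by_cases h2 : ∃ c' ∈ L, pvWrap n c' = j <;>
          by_cases h3 : pvWrap n c = j <;>
            simp [h1, h2, h3, hmem]

lemma cell_rowfold {n : Nat} (R L : List Int) (v : Int)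
    (hR : ∀ r ∈ R, -(n : Int) ≤ r ∧ r < n)
    (hL : ∀ c ∈ L, -(n : Int) ≤ c ∧ c < n) {i j : Nat} (hi : i < n) (hj : j < n) :
    ∀ {t : List (List Int)}, pvShape t n →
      pvCell (R.foldl (fun t' r => L.foldl (fun t'' c => pvSet2 t'' r c v) t') t) i j =
        if (∃ r ∈ R, pvWrap n r = i) ∧ (∃ c ∈ L, pvWrap n c = j) then v
        else pvCell t i j := by
  induction R with
  | nil => intro t _; simp
  | cons r R ih =>
      intro t ht
      have hr := hR r (List.mem_cons_self ..)
      have hrest : ∀ r' ∈ R, -(n : Int) ≤ r' ∧ r' < n :=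
        fun r' h => hR r' (List.mem_cons_of_mem _ h)
      simp only [List.foldl_cons]
      rw [ih hrest (shape_colfold L r v ht),
          cell_colfold L r v hr.1 hr.2 hL hi hj ht]
      have hmem : (∃ r' ∈ r :: R, pvWrap n r' = i) ↔
          (pvWrap n r = i ∨ ∃ r' ∈ R, pvWrap n r' = i) := by
        simp [List.mem_cons]
      by_cases h1 : pvWrap n r = i <;>
        by_cases h2 : ∃ r' ∈ R, pvWrap n r' = i <;>
          by_cases h3 : ∃ c ∈ L, pvWrap n c = j <;>
            simp [h1, h2, h3, hmem]

lemma shape_pvPaint {n : Nat} (a b u v w : Int) {t : List (List Int)} (ht : pvShape t n) :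
    pvShape (pvPaint a b u v w t) n := by
  unfold pvPaint
  generalize PySem.List.pyRange a b 1 = R
  induction R generalizing t with
  | nil => simpa using ht
  | cons r R ih => simpa using ih (shape_colfold _ r w ht)

lemma cell_pvPaint {n : Nat} (a b u v w : Int)
    (hsafe : a < b → u < v → (-(n : Int) ≤ a ∧ b ≤ n ∧ -(n : Int) ≤ u ∧ v ≤ n))
    {t : List (List Int)} (ht : pvShape t n) {i j : Nat} (hi : i < n) (hj : j < n) :
    pvCell (pvPaint a b u v w t) i j =
      if (∃ r ∈ PySem.List.pyRange a b 1, pvWrap n r = i) ∧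
         (∃ c ∈ PySem.List.pyRange u v 1, pvWrap n c = j)
      then w else pvCell t i j := by
  by_cases hab : a < b
  · by_cases huv : u < v
    · obtain ⟨h1, h2, h3, h4⟩ := hsafe hab huv
      unfold pvPaint
      rw [cell_rowfold (PySem.List.pyRange a b 1) (PySem.List.pyRange u v 1) w
        (fun r hr => by rw [PySem.List.mem_pyRange_one] at hr; omega)
        (fun c hc => by rw [PySem.List.mem_pyRange_one] at hc; omega) hi hj ht]
    · unfold pvPaint
      rw [PySem.List.pyRange_one_eq_nil (by omega : v ≤ u)]
      have hfix : ∀ (t' : List (List Int)) (r : Int),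
          List.foldl (fun t'' c => pvSet2 t'' r c w) t' ([] : List Int) = t' :=
        fun _ _ => rfl
      rw [List.foldl_fixed' (fun b' => hfix t b')]
      simp
  · unfold pvPaint
    rw [PySem.List.pyRange_one_eq_nil (by omega : b ≤ a)]
    simp

-- images of the executed index ranges on the grid
lemma ex_wrap_full {n : Nat} (a : Int) {i : Nat} (hi : i < n)
    (ha : a < n → -(n : Int) ≤ a) :
    (∃ r, a ≤ r ∧ r < (n : Int) ∧ pvWrap n r = i) ↔ a ≤ (i : Int) := by
  constructor
  · rintro ⟨r, h1, h2, h3⟩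
    have := ha (by omega)
    unfold pvWrap at h3
    split_ifs at h3 <;> omega
  · intro h
    refine ⟨(i : Int), h, by omega, ?_⟩
    unfold pvWrap
    split_ifs <;> omega

lemma ex_nowrap {n : Nat} (a b : Int) {i : Nat} (hi : i < n) (ha : 0 ≤ a)
    (hb : a < b → b ≤ (n : Int)) :
    (∃ r, a ≤ r ∧ r < b ∧ pvWrap n r = i) ↔ (a ≤ (i : Int) ∧ (i : Int) < b) := by
  constructor
  · rintro ⟨r, h1, h2, h3⟩
    unfold pvWrap at h3
    split_ifs at h3 <;> omega
  · rintro ⟨h1, h2⟩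
    refine ⟨(i : Int), h1, h2, ?_⟩
    unfold pvWrap
    split_ifs <;> omega

-- the core computation: each cell of A's finished table equals B's label
lemma cell_eq_label (N x y d1 d2 : Int)
    (C1 : (2 ≤ x + d1 ∧ 1 ≤ y) → (x + d1 - 1 ≤ N ∧ y ≤ N))
    (C2 : (1 ≤ x + d2 ∧ y + 1 ≤ N) → (x + d2 ≤ N ∧ -(N + 1) ≤ y + 1))
    (C3 : (x + d1 ≤ N ∧ 2 ≤ y - d1 + d2) → (-(N + 1) ≤ x + d1 ∧ y - d1 + d2 - 1 ≤ N))
    (C4 : (x + d2 + 1 ≤ N ∧ y - d1 + d2 ≤ N) →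
      (-(N + 1) ≤ x + d2 + 1 ∧ -(N + 1) ≤ y - d1 + d2))
    {i j : Nat} (hi : i < (N + 1).toNat) (hj : j < (N + 1).toNat) :
    pvCell (one_and_four N [x, y, d1, d2]) i j = pvLabel N x y d1 d2 i j := by
  set n := (N + 1).toNat with hn
  have hnN : (n : Int) = N + 1 := by omega
  have sh0 : pvShape (List.replicate n (List.replicate n (0 : Int))) n := by
    refine ⟨by simp, ?_⟩
    intro row hrow
    rw [List.eq_of_mem_replicate hrow]; simp
  have sh1 := shape_pvPaint 1 (x + d1) 1 (y + 1) 1 sh0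
  have sh2 := shape_pvPaint 1 (x + d2 + 1) (y + 1) (N + 1) 2 sh1
  have sh3 := shape_pvPaint (x + d1) (N + 1) 1 (y - d1 + d2) 3 sh2
  show pvCell (pvPaint (x + d2 + 1) (N + 1) (y - d1 + d2) (N + 1) 4
      (pvPaint (x + d1) (N + 1) 1 (y - d1 + d2) 3
        (pvPaint 1 (x + d2 + 1) (y + 1) (N + 1) 2
          (pvPaint 1 (x + d1) 1 (y + 1) 1
            (List.replicate n (List.replicate n (0 : Int))))))) i j = _
  rw [cell_pvPaint _ _ _ _ _ (fun h1 h2 => by omega) sh3 hi hj,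
      cell_pvPaint _ _ _ _ _ (fun h1 h2 => by omega) sh2 hi hj,
      cell_pvPaint _ _ _ _ _ (fun h1 h2 => by omega) sh1 hi hj,
      cell_pvPaint _ _ _ _ _ (fun h1 h2 => by omega) sh0 hi hj]
  have hcell0 : pvCell (List.replicate n (List.replicate n (0 : Int))) i j = 0 := by
    unfold pvCell
    rw [List.getD_replicate _ hi, List.getD_replicate _ hj]
  rw [hcell0]
  have e1 : ((∃ r ∈ PySem.List.pyRange 1 (x + d1) 1, pvWrap n r = i) ∧
      (∃ c ∈ PySem.List.pyRange 1 (y + 1) 1, pvWrap n c = j)) ↔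
      (1 ≤ (i : Int) ∧ (i : Int) < x + d1 ∧ 1 ≤ (j : Int) ∧ (j : Int) ≤ y) := by
    simp only [PySem.List.mem_pyRange_one, and_assoc]
    by_cases hex : 2 ≤ x + d1 ∧ 1 ≤ y
    · obtain ⟨hP, hQ⟩ := C1 hex
      obtain ⟨hex1, hex2⟩ := hex
      rw [ex_nowrap _ _ hi (by omega) (fun _ => by omega),
          ex_nowrap _ _ hj (by omega) (fun _ => by omega)]
      omega
    · constructor
      · rintro ⟨⟨r, hr1', hr2', -⟩, ⟨c, hc1', hc2', -⟩⟩
        exact absurd ⟨by omega, by omega⟩ hex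
      · intro h
        exact absurd ⟨by omega, by omega⟩ hex
  have e2 : ((∃ r ∈ PySem.List.pyRange 1 (x + d2 + 1) 1, pvWrap n r = i) ∧
      (∃ c ∈ PySem.List.pyRange (y + 1) (N + 1) 1, pvWrap n c = j)) ↔
      (1 ≤ (i : Int) ∧ (i : Int) ≤ x + d2 ∧ y + 1 ≤ (j : Int) ∧ (j : Int) ≤ N) := by
    simp only [PySem.List.mem_pyRange_one, and_assoc]
    by_cases hex : 1 ≤ x + d2 ∧ y + 1 ≤ N
    · obtain ⟨hP, hQ⟩ := C2 hex
      obtain ⟨hex1, hex2⟩ := hex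
      rw [ex_nowrap _ _ hi (by omega) (fun _ => by omega),
          show (N + 1 : Int) = (n : Int) by omega,
          ex_wrap_full _ hj (fun _ => by omega)]
      omega
    · constructor
      · rintro ⟨⟨r, hr1', hr2', -⟩, ⟨c, hc1', hc2', -⟩⟩
        exact absurd ⟨by omega, by omega⟩ hex
      · intro h
        exact absurd ⟨by omega, by omega⟩ hex
  have e3 : ((∃ r ∈ PySem.List.pyRange (x + d1) (N + 1) 1, pvWrap n r = i) ∧
      (∃ c ∈ PySem.List.pyRange 1 (y - d1 + d2) 1, pvWrap n c = j)) ↔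
      (x + d1 ≤ (i : Int) ∧ (i : Int) ≤ N ∧ 1 ≤ (j : Int) ∧ (j : Int) < y - d1 + d2) := by
    simp only [PySem.List.mem_pyRange_one, and_assoc]
    by_cases hex : x + d1 ≤ N ∧ 2 ≤ y - d1 + d2
    · obtain ⟨hP, hQ⟩ := C3 hex
      obtain ⟨hex1, hex2⟩ := hex
      rw [show (N + 1 : Int) = (n : Int) by omega,
          ex_wrap_full _ hi (fun _ => by omega),
          ex_nowrap _ _ hj (by omega) (fun _ => by omega)]
      omega
    · constructor
      · rintro ⟨⟨r, hr1', hr2', -⟩, ⟨c, hc1', hc2', -⟩⟩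
        exact absurd ⟨by omega, by omega⟩ hex
      · intro h
        exact absurd ⟨by omega, by omega⟩ hex
  have e4 : ((∃ r ∈ PySem.List.pyRange (x + d2 + 1) (N + 1) 1, pvWrap n r = i) ∧
      (∃ c ∈ PySem.List.pyRange (y - d1 + d2) (N + 1) 1, pvWrap n c = j)) ↔
      (x + d2 + 1 ≤ (i : Int) ∧ (i : Int) ≤ N ∧ y - d1 + d2 ≤ (j : Int) ∧ (j : Int) ≤ N) := by
    simp only [PySem.List.mem_pyRange_one, and_assoc]
    by_cases hex : x + d2 + 1 ≤ N ∧ y - d1 + d2 ≤ N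
    · obtain ⟨hP, hQ⟩ := C4 hex
      obtain ⟨hex1, hex2⟩ := hex
      rw [show (N + 1 : Int) = (n : Int) by omega,
          ex_wrap_full _ hi (fun _ => by omega),
          ex_wrap_full _ hj (fun _ => by omega)]
      omega
    · constructor
      · rintro ⟨⟨r, hr1', hr2', -⟩, ⟨c, hc1', hc2', -⟩⟩
        exact absurd ⟨by omega, by omega⟩ hex
      · intro h
        exact absurd ⟨by omega, by omega⟩ hex
  rw [if_congr e4 rfl rfl, if_congr e3 rfl rfl, if_congr e2 rfl rfl, if_congr e1 rfl rfl]
  rfl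

-- ===== VERDICT (by name: the statement is the Claim_ definition above) =====
theorem one_and_four_spec : Claim_equal_one_and_four := by
  intro N district _ hPre
  unfold Spec_one_and_four
  obtain ⟨hlen, hC⟩ := hPre
  obtain ⟨x, y, d1, d2, rfl⟩ : ∃ x y d1 d2, district = [x, y, d1, d2] := by
    rcases district with _ | ⟨x, _ | ⟨y, _ | ⟨d1, _ | ⟨d2, _ | ⟨e, rest⟩⟩⟩⟩⟩ <;>
        simp only [List.length_cons, List.length_nil] at hlen <;>
      first
        | exact ⟨_, _, _, _, rfl⟩
        | omega
  have e0 : PySem.List.pyGetD [x, y, d1, d2] 0 0 = x := rfl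
  have e1' : PySem.List.pyGetD [x, y, d1, d2] 1 0 = y := rfl
  have e2' : PySem.List.pyGetD [x, y, d1, d2] 2 0 = d1 := rfl
  have e3' : PySem.List.pyGetD [x, y, d1, d2] 3 0 = d2 := rfl
  simp only [e0, e1', e2', e3'] at hC
  obtain ⟨C1, C2, C3, C4⟩ := hC
  set n := (N + 1).toNat with hn
  have sh0 : pvShape (List.replicate n (List.replicate n (0 : Int))) n := by
    refine ⟨by simp, ?_⟩
    intro row hrow
    rw [List.eq_of_mem_replicate hrow]; simp
  have shA : pvShape (one_and_four N [x, y, d1, d2]) n := by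
    show pvShape (pvPaint (x + d2 + 1) (N + 1) (y - d1 + d2) (N + 1) 4
      (pvPaint (x + d1) (N + 1) 1 (y - d1 + d2) 3
        (pvPaint 1 (x + d2 + 1) (y + 1) (N + 1) 2
          (pvPaint 1 (x + d1) 1 (y + 1) 1
            (List.replicate n (List.replicate n (0 : Int))))))) n
    exact shape_pvPaint _ _ _ _ _ (shape_pvPaint _ _ _ _ _
      (shape_pvPaint _ _ _ _ _ (shape_pvPaint _ _ _ _ _ sh0)))
  have haltdef : one_and_four_alt N [x, y, d1, d2] =
      (PySem.List.pyRange 0 (N + 1) 1).map (fun r =>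
        (PySem.List.pyRange 0 (N + 1) 1).map (fun c => pvLabel N x y d1 d2 r c)) := by
    unfold one_and_four_alt
    simp only [e0, e1', e2', e3', List.length_cons, List.length_nil, if_pos]
  rw [haltdef]
  apply List.ext_getElem
    (by rw [shA.1, List.length_map, PySem.List.length_pyRange_one]; omega)
  intro i hiA hiB
  have hi : i < n := shA.1 ▸ hiA
  have hrowA : (one_and_four N [x, y, d1, d2])[i].length = n :=
    shA.2 _ (List.getElem_mem _)
  apply List.ext_getElem
  · rw [hrowA, List.getElem_map, PySem.List.getElem_pyRange_one,
        List.length_map, PySem.List.length_pyRange_one]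
    omega
  · intro j hjA hjB
    have hj : j < n := hrowA ▸ hjA
    have hB : ((PySem.List.pyRange 0 (N + 1) 1).map (fun r =>
        (PySem.List.pyRange 0 (N + 1) 1).map
          (fun c => pvLabel N x y d1 d2 r c)))[i][j] = pvLabel N x y d1 d2 i j := by
      simp only [List.getElem_map, PySem.List.getElem_pyRange_one]
      norm_num
    have hA : (one_and_four N [x, y, d1, d2])[i][j] =
        pvCell (one_and_four N [x, y, d1, d2]) i j := by
      unfold pvCell
      rw [List.getD_eq_getElem (l := one_and_four N [x, y, d1, d2]) _
            (by rw [shA.1]; exact hi),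
          List.getD_eq_getElem _ _ hjA]
    rw [hB, hA, cell_eq_label N x y d1 d2 C1 C2 C3 C4 hi hj]
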